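-- pv_equiv track=rewrite | github.com/GyroPower/Simple-Clothe-Store-App-Django | Simple_Store_D/car_shop/views.py | get_clothe_id_color_id_size_id
-- ===== SOURCE A (Python) =====
-- def get_clothe_id_color_id_size_id(string_id):
--     count = 0
--     clothe_id = ""
--     color_id = ""
--     size_id = ""
--     for i in range(len(string_id)):
--         if count < 1 and string_id[i] != "-":
--             clothe_id +=string_id[i]
--         elif 1==count<2 and string_id[i] != '-':
--             color_id += string_id[i]
--         elif 2==count<3 and string_id[i] != "-":
--             size_id += string_id[i]
--         else:
--             count +=1
--
--     return clothe_id,color_id,size_id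
-- ===== SOURCE B (Python) =====
-- def get_clothe_id_color_id_size_id(string_id):
--     parts = (string_id.split('-') + ['', '', ''])[:3]
--     return parts[0], parts[1], parts[2]
-- ===== Notes on version B (the rewrite author's own statement) =====
-- stated objective: simpler
-- what changed: Replaced the character-by-character counter state machine with one library split on the dash separator followed by padding with empty strings and truncating to three parts.
import Mathlib
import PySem

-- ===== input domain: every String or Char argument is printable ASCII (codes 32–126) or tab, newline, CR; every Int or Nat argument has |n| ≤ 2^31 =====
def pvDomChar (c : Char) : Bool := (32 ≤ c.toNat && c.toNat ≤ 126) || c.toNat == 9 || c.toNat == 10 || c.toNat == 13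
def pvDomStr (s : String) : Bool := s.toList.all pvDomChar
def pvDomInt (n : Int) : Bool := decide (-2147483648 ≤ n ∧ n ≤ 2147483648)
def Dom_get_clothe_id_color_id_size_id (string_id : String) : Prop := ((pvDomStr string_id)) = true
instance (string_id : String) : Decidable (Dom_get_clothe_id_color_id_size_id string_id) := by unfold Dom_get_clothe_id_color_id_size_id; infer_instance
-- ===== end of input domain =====

-- B replaces A's character-by-character counter state machine by one split on '-' plus pad/truncate to three parts (simpler).


-- ===== PORT A =====
-- loop body of A: state (count, clothe_id, color_id, size_id); the three strings are carried as
-- List Char and built char by char by append, exactly as A concatenates one-character strings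
def pvStepA (st : Int × List Char × List Char × List Char) (c : Char) :
    Int × List Char × List Char × List Char :=
  if st.1 < 1 ∧ c ≠ '-' then (st.1, st.2.1 ++ [c], st.2.2.1, st.2.2.2)
  else if (1 = st.1 ∧ st.1 < 2) ∧ c ≠ '-' then (st.1, st.2.1, st.2.2.1 ++ [c], st.2.2.2)
  else if (2 = st.1 ∧ st.1 < 3) ∧ c ≠ '-' then (st.1, st.2.1, st.2.2.1, st.2.2.2 ++ [c])
  else (st.1 + 1, st.2.1, st.2.2.1, st.2.2.2)

def get_clothe_id_color_id_size_id (string_id : String) : String × String × String :=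
  let r := string_id.toList.foldl pvStepA (0, [], [], [])
  (String.ofList r.2.1, String.ofList r.2.2.1, String.ofList r.2.2.2)

-- ===== PORT B =====
-- string_id.split('-') for the literal non-empty one-char separator is exactly List.splitOn '-' on
-- the char list; (parts + ['','',''])[:3] with its non-negative bound is List.take 3 of the padded
-- list; parts[i] for i = 0,1,2 on the resulting length-3 list is getD i "" (the default never fires)
def get_clothe_id_color_id_size_id_alt (string_id : String) : String × String × String :=
  let parts : List String := (string_id.toList.splitOn '-').map String.ofList
  let p := (parts ++ ["", "", ""]).take 3
  (p.getD 0 "", p.getD 1 "", p.getD 2 "")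

-- ===== PRECONDITION & SPEC =====
def Spec_get_clothe_id_color_id_size_id (string_id : String) (out : String × String × String) : Prop := out = get_clothe_id_color_id_size_id_alt string_id
instance (string_id : String) (out : String × String × String) : Decidable (Spec_get_clothe_id_color_id_size_id string_id out) := by unfold Spec_get_clothe_id_color_id_size_id; infer_instance

-- ===== CLAIM (what is proved, stated in full; the proofs are below) =====
def Claim_equal_get_clothe_id_color_id_size_id : Prop := ∀ (string_id : String), Dom_get_clothe_id_color_id_size_id string_id → Spec_get_clothe_id_color_id_size_id string_id (get_clothe_id_color_id_size_id string_id)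

-- ===== LEMMAS AND PROOFS =====

theorem pvSp_ne_nil (cs : List Char) : cs.splitOn '-' ≠ [] :=
  List.splitOnP_ne_nil _ cs

theorem pvSp_cons (c : Char) (cs : List Char) :
    (c :: cs).splitOn '-' =
      if c = '-' then [] :: cs.splitOn '-' else (cs.splitOn '-').modifyHead (List.cons c) := by
  by_cases hc : c = '-' <;> simp [List.splitOn, List.splitOnP_cons, hc]

-- the first '-'-token of cs is its longest '-'-free prefix
theorem pvTok0 (cs : List Char) :
    (cs.splitOn '-').getD 0 [] = cs.takeWhile (fun x => x ≠ '-') := by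
  induction cs with
  | nil => simp [List.splitOn]
  | cons c cs ih =>
    by_cases hc : c = '-'
    · simp [pvSp_cons, hc]
    · obtain ⟨t, ts, h⟩ := List.exists_cons_of_ne_nil (pvSp_ne_nil cs)
      rw [h] at ih; simp at ih
      simp [pvSp_cons, hc, h, ih]

-- once count ≥ 3, A's loop only increments count: the three accumulators are frozen
theorem pvL3 (cs : List Char) : ∀ (n : Int), 3 ≤ n → ∀ a b d : List Char,
    (List.foldl pvStepA (n, a, b, d) cs).2 = (a, b, d) := by
  induction cs with
  | nil => intro n _ a b d; rfl
  | cons c cs ih =>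
    intro n hn a b d
    have hs : pvStepA (n, a, b, d) c = (n + 1, a, b, d) := by
      simp only [pvStepA]
      rw [if_neg (by rintro ⟨h1, -⟩; omega), if_neg (by rintro ⟨⟨h1, -⟩, -⟩; omega),
          if_neg (by rintro ⟨⟨h1, -⟩, -⟩; omega)]
    rw [List.foldl_cons, hs]
    exact ih (n + 1) (by omega) a b d

-- at count = 2 the loop appends the longest '-'-free prefix to the third accumulator
theorem pvL2 (cs : List Char) : ∀ a b d : List Char,
    (List.foldl pvStepA (2, a, b, d) cs).2 = (a, b, d ++ cs.takeWhile (fun x => x ≠ '-')) := by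
  induction cs with
  | nil => intro a b d; simp
  | cons c cs ih =>
    intro a b d
    by_cases hc : c = '-'
    · have hs : pvStepA (2, a, b, d) c = (3, a, b, d) := by
        norm_num [pvStepA, hc]
      rw [List.foldl_cons, hs, pvL3 cs 3 (by omega) a b d]
      simp [hc]
    · have hs : pvStepA (2, a, b, d) c = (2, a, b, d ++ [c]) := by
        norm_num [pvStepA, hc]
      rw [List.foldl_cons, hs, ih a b (d ++ [c])]
      simp [hc]
-- at count = 1 the loop fills the second and third fields with tokens 0 and 1 of the rest
theorem pvL1 (cs : List Char) : ∀ a b : List Char,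
    (List.foldl pvStepA (1, a, b, []) cs).2 =
      (a, b ++ (cs.splitOn '-').getD 0 [], (cs.splitOn '-').getD 1 []) := by
  induction cs with
  | nil => intro a b; simp [List.splitOn]
  | cons c cs ih =>
    intro a b
    by_cases hc : c = '-'
    · have hs : pvStepA (1, a, b, []) c = (2, a, b, []) := by
        norm_num [pvStepA, hc]
      rw [List.foldl_cons, hs, pvL2 cs a b []]
      have h0 := pvTok0 cs
      simp at h0
      simp [pvSp_cons, hc, h0]
    · have hs : pvStepA (1, a, b, []) c = (1, a, b ++ [c], []) := by
        norm_num [pvStepA, hc]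
      obtain ⟨t, ts, h⟩ := List.exists_cons_of_ne_nil (pvSp_ne_nil cs)
      rw [List.foldl_cons, hs, ih a (b ++ [c])]
      simp [pvSp_cons, hc, h]

-- from count = 0 the loop computes exactly the first three '-'-tokens
theorem pvL0 (cs : List Char) : ∀ a : List Char,
    (List.foldl pvStepA (0, a, [], []) cs).2 =
      (a ++ (cs.splitOn '-').getD 0 [], (cs.splitOn '-').getD 1 [], (cs.splitOn '-').getD 2 []) := by
  induction cs with
  | nil => intro a; simp [List.splitOn]
  | cons c cs ih =>
    intro a
    by_cases hc : c = '-'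
    · have hs : pvStepA (0, a, [], []) c = (1, a, [], []) := by
        norm_num [pvStepA, hc]
      rw [List.foldl_cons, hs, pvL1 cs a []]
      simp [pvSp_cons, hc]
    · have hs : pvStepA (0, a, [], []) c = (0, a ++ [c], [], []) := by
        norm_num [pvStepA, hc]
      obtain ⟨t, ts, h⟩ := List.exists_cons_of_ne_nil (pvSp_ne_nil cs)
      rw [List.foldl_cons, hs, ih (a ++ [c])]
      simp [pvSp_cons, hc, h]

-- padding with three empties and truncating to three, then indexing, is getD on the token list
theorem pvPad (l : List (List Char)) :
    ((((l.map String.ofList ++ ["", "", ""]).take 3).getD 0 ""),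
     (((l.map String.ofList ++ ["", "", ""]).take 3).getD 1 ""),
     (((l.map String.ofList ++ ["", "", ""]).take 3).getD 2 "")) =
      (String.ofList (l.getD 0 []), String.ofList (l.getD 1 []), String.ofList (l.getD 2 [])) := by
  match l with
  | [] => rfl
  | [x] => rfl
  | [x, y] => rfl
  | x :: y :: z :: r => simp [List.getD]

-- ===== VERDICT (by name: the statement is the Claim_ definition above) =====
theorem get_clothe_id_color_id_size_id_spec : Claim_equal_get_clothe_id_color_id_size_id := by
  intro string_id _
  unfold Spec_get_clothe_id_color_id_size_id
  simp only [get_clothe_id_color_id_size_id, get_clothe_id_color_id_size_id_alt]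
  have h := pvL0 string_id.toList []
  simp only [List.nil_append] at h
  simp only [h]
  exact (pvPad (string_id.toList.splitOn '-')).symm
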